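-- pv_equiv track=rewrite | github.com/thuthancs/sorting-algo-benchmark | viz/heap_sort_viz.py | heap_sort_steps
-- ===== SOURCE A (Python) =====
-- from typing import Generator, Tuple, Optional, List
--
-- def heap_sort_steps(
--     arr: List[int],
-- ) -> Generator[Tuple[List[int], Optional[tuple[int, ...]]], None, None]:
--     if not arr:
--         yield [], None
--         return
--
--     a = arr.copy()
--     n = len(a)
--
--     yield a[:], None  # initial
--
--     # --- helpers (steps version) ---
--     def max_heapify_steps(i: int, heap_size: int):
--         while True:
--             l = 2 * i + 1
--             r = 2 * i + 2
--             largest = i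
--
--             # highlight comparisons
--             if l < heap_size:
--                 yield a[:], (i, l)
--                 if a[l] > a[largest]:
--                     largest = l
--             if r < heap_size:
--                 yield a[:], (largest, r)
--                 if a[r] > a[largest]:
--                     largest = r
--
--             if largest == i:
--                 break
--
--             a[i], a[largest] = a[largest], a[i]
--             yield a[:], (i, largest)  # swap
--             i = largest
--
--     # build max heap
--     for i in range(n // 2 - 1, -1, -1):
--         yield from max_heapify_steps(i, n)
--
--     # extract max repeatedly
--     for end in range(n - 1, 0, -1):
--         a[0], a[end] = a[end], a[0]
--         yield a[:], (0, end)  # swap max to the end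
--         yield from max_heapify_steps(0, end)
--
--     yield a[:], None  # final
-- ===== SOURCE B (Python) =====
-- from typing import Generator, Tuple, Optional, List
--
--
-- def heap_sort_steps(
--     arr: List[int],
-- ) -> Generator[Tuple[List[int], Optional[tuple[int, ...]]], None, None]:
--     if not arr:
--         yield [], None
--         return
--
--     a = list(arr)
--     n = len(a)
--     yield a[:], None  # initial
--
--     # One flat worklist-driven state machine instead of nested loops with
--     # recursive/looping sift-down: the whole sort is a pre-computed agenda of
--     # jobs, and sift-down continuation jobs are pushed to the front.
--     agenda: list = [("sift", i, n) for i in range(n // 2 - 1, -1, -1)]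
--     agenda += [("extract", end) for end in range(n - 1, 0, -1)]
--
--     while agenda:
--         job = agenda.pop(0)
--         if job[0] == "extract":
--             end = job[1]
--             a[0], a[end] = a[end], a[0]
--             yield a[:], (0, end)  # swap max to the end
--             agenda.insert(0, ("sift", 0, end))
--         else:
--             _, i, size = job
--             l, r, largest = 2 * i + 1, 2 * i + 2, i
--             if l < size:
--                 yield a[:], (i, l)
--                 if a[l] > a[largest]:
--                     largest = l
--             if r < size:
--                 yield a[:], (largest, r)
--                 if a[r] > a[largest]:
--                     largest = r
--             if largest != i:
--                 a[i], a[largest] = a[largest], a[i]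
--                 yield a[:], (i, largest)
--                 agenda.insert(0, ("sift", largest, size))
--
--     yield a[:], None  # final
-- ===== Notes on version B (the rewrite author's own statement) =====
-- stated objective: alternative
-- what changed: The nested build/extract loops with a `yield from` sift-down subgenerator are replaced by a single flat worklist state machine: a pre-computed agenda of ('sift',i,n)/('extract',end) jobs consumed by one while loop, with sift-down continuations pushed back onto the agenda instead of looping or recursing; the emitted trace is identical.
import Mathlib
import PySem

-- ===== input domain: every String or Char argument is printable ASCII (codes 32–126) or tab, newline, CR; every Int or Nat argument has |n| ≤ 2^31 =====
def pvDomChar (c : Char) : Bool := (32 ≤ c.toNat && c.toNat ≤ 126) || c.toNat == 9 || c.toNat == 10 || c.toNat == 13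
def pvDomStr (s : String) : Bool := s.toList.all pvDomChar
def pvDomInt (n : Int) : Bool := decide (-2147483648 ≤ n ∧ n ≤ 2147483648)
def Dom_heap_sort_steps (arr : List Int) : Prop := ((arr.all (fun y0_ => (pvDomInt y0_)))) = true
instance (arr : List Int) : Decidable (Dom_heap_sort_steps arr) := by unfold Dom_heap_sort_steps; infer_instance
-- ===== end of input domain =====

-- B replaces A's nested loops with a `yield from` sift-down subgenerator by a single flat
-- worklist state machine (an agenda of sift/extract jobs consumed by one while loop);
-- objective: alternative decomposition, the emitted trace is identical.

-- ===== PORT A =====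

-- `a[i], a[j] = a[j], a[i]` on distinct in-range indices (shared by both ports)
def listSwap (a : List Int) (i j : Nat) : List Int :=
  (a.set i (a.getD j 0)).set j (a.getD i 0)

-- A's `while True` sift-down, tail-recursive over the loop state (a, i, acc of yielded
-- steps).  `fuel` only makes the loop structurally total; callers pass `hs`, an upper
-- bound on the number of iterations (i strictly increases below hs), so the fuel-0
-- branch is never taken on the calls the ports make.
def heapifyA (fuel : Nat) (a : List Int) (i hs : Nat)
    (acc : List (List Int × Option (List Int))) :
    List (List Int × Option (List Int)) × List Int :=
  match fuel with
  | 0 => (acc, a)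
  | fuel + 1 =>
    let l := 2 * i + 1
    let r := 2 * i + 2
    let largest0 := i
    let acc1 := if l < hs then acc ++ [(a, some [(i : Int), (l : Int)])] else acc
    let largest1 := if l < hs ∧ a.getD l 0 > a.getD largest0 0 then l else largest0
    let acc2 := if r < hs then acc1 ++ [(a, some [(largest1 : Int), (r : Int)])] else acc1
    let largest := if r < hs ∧ a.getD r 0 > a.getD largest1 0 then r else largest1
    if largest = i then (acc2, a)
    else
      let a2 := listSwap a i largest
      heapifyA fuel a2 largest hs (acc2 ++ [(a2, some [(i : Int), (largest : Int)])])

def heap_sort_steps (arr : List Int) : List (List Int × Option (List Int)) :=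
  if arr = [] then [([], none)]
  else
    let a := arr
    let n := a.length
    -- initial yield, then build max heap: for i in range(n//2 - 1, -1, -1)
    let st1 := (PySem.List.pyRange (PySem.Int.floordiv (n : Int) 2 - 1) (-1) (-1)).foldl
      (fun st i => heapifyA n st.2 i.toNat n st.1)
      (([(a, (none : Option (List Int)))], a))
    -- extract max repeatedly: for end in range(n - 1, 0, -1)
    let st2 := (PySem.List.pyRange ((n : Int) - 1) 0 (-1)).foldl
      (fun st e =>
        let en := e.toNat
        let a2 := listSwap st.2 0 en
        heapifyA en a2 0 en (st.1 ++ [(a2, some [(0 : Int), e])]))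
      st1
    st2.1 ++ [(st2.2, (none : Option (List Int)))]

-- ===== PORT B =====

-- Source B's agenda entries ('sift', i, size) / ('extract', end)
inductive PvJob
  | sift : Nat → Nat → PvJob
  | extract : Nat → PvJob
deriving DecidableEq, Repr

-- termination measure for the worklist loop (proof device only; the Python while
-- loop terminates for the same reason)
def pvJobWeight : PvJob → Nat
  | .sift i size => size - i + 1
  | .extract e => e + 2

-- Source B's `largest` after the left-child comparison, and after both comparisons
def pvLargest1 (a : List Int) (i size : Nat) : Nat :=
  if 2 * i + 1 < size ∧ a.getD (2 * i + 1) 0 > a.getD i 0 then 2 * i + 1 else i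

def pvLargest (a : List Int) (i size : Nat) : Nat :=
  if 2 * i + 2 < size ∧ a.getD (2 * i + 2) 0 > a.getD (pvLargest1 a i size) 0 then 2 * i + 2
  else pvLargest1 a i size

-- bounds used only for termination of the worklist loop
theorem pvLargest_bounds (a : List Int) (i size : Nat) (h : pvLargest a i size ≠ i) :
    i < pvLargest a i size ∧ pvLargest a i size < size := by
  unfold pvLargest pvLargest1 at *
  split_ifs at * <;> omega

-- Source B's `while agenda:` loop: pop(0) = head, insert(0, job) = cons; the pair
-- returned is (steps yielded so far, current array).
def pvRun (jobs : List PvJob) (a : List Int)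
    (acc : List (List Int × Option (List Int))) :
    List (List Int × Option (List Int)) × List Int :=
  match jobs with
  | [] => (acc, a)
  | PvJob.extract e :: rest =>
      let a2 := listSwap a 0 e
      pvRun (PvJob.sift 0 e :: rest) a2 (acc ++ [(a2, some [(0 : Int), (e : Int)])])
  | PvJob.sift i size :: rest =>
      let l := 2 * i + 1
      let r := 2 * i + 2
      let acc1 := if l < size then acc ++ [(a, some [(i : Int), (l : Int)])] else acc
      let acc2 := if r < size then
          acc1 ++ [(a, some [((pvLargest1 a i size : Nat) : Int), (r : Int)])]
        else acc1
      if _h : pvLargest a i size = i then pvRun rest a acc2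
      else
        let a2 := listSwap a i (pvLargest a i size)
        pvRun (PvJob.sift (pvLargest a i size) size :: rest) a2
          (acc2 ++ [(a2, some [(i : Int), ((pvLargest a i size : Nat) : Int)])])
termination_by (jobs.map pvJobWeight).sum
decreasing_by
  · simp [pvJobWeight]
  · simp [pvJobWeight]
  · simp only [List.map_cons, List.sum_cons, pvJobWeight]
    have hb := pvLargest_bounds a i size _h
    omega

def heap_sort_steps_alt (arr : List Int) : List (List Int × Option (List Int)) :=
  if arr = [] then [([], none)]
  else
    let a := arr
    let n := a.length
    -- agenda = sift jobs for range(n//2 - 1, -1, -1) then extract jobs for range(n-1, 0, -1)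
    let agenda :=
      ((PySem.List.pyRange (PySem.Int.floordiv (n : Int) 2 - 1) (-1) (-1)).map
        (fun i => PvJob.sift i.toNat n))
      ++ ((PySem.List.pyRange ((n : Int) - 1) 0 (-1)).map (fun e => PvJob.extract e.toNat))
    let p := pvRun agenda a [(a, (none : Option (List Int)))]
    p.1 ++ [(p.2, (none : Option (List Int)))]

-- ===== PRECONDITION & SPEC =====
def Spec_heap_sort_steps (arr : List Int) (out : List (List Int × Option (List Int))) : Prop := out = heap_sort_steps_alt arr
instance (arr : List Int) (out : List (List Int × Option (List Int))) : Decidable (Spec_heap_sort_steps arr out) := by unfold Spec_heap_sort_steps; infer_instance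

-- ===== CLAIM (what is proved, stated in full; the proofs are below) =====
def Claim_equal_heap_sort_steps : Prop := ∀ (arr : List Int), Dom_heap_sort_steps arr → Spec_heap_sort_steps arr (heap_sort_steps arr)

-- ===== LEMMAS AND PROOFS =====

-- A sift job at the head of the agenda yields exactly what one call of A's
-- sift-down loop yields, provided the fuel covers the iteration bound hs - i.
theorem pvRun_sift (fuel : Nat) (jobs : List PvJob) (a : List Int) (i hs : Nat)
    (acc : List (List Int × Option (List Int)))
    (h1 : 1 ≤ fuel) (h2 : hs ≤ fuel + i) :
    pvRun (PvJob.sift i hs :: jobs) a acc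
      = pvRun jobs (heapifyA fuel a i hs acc).2 (heapifyA fuel a i hs acc).1 := by
  induction fuel generalizing a i acc with
  | zero => omega
  | succ f ih =>
    rw [pvRun, heapifyA]
    simp only [pvLargest, pvLargest1]
    split_ifs <;>
      first
        | rfl
        | omega
        | (rw [ih] <;> omega)

-- A run of sift jobs is A's build-heap fold.
theorem pvRun_sifts (n : Nat) (hn : 1 ≤ n) (l : List Nat) (jobs : List PvJob)
    (a : List Int) (acc : List (List Int × Option (List Int))) :
    pvRun (l.map (fun i => PvJob.sift i n) ++ jobs) a acc
      = pvRun jobs (l.foldl (fun st i => heapifyA n st.2 i n st.1) (acc, a)).2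
                   (l.foldl (fun st i => heapifyA n st.2 i n st.1) (acc, a)).1 := by
  induction l generalizing a acc with
  | nil => simp
  | cons x xs ih =>
    simp only [List.map_cons, List.cons_append, List.foldl_cons]
    rw [pvRun_sift n _ _ _ _ _ hn (by omega)]
    exact ih _ _

-- A run of extract jobs is A's extract-max fold.
theorem pvRun_extracts (l : List Nat) (hl : ∀ e ∈ l, 1 ≤ e)
    (a : List Int) (acc : List (List Int × Option (List Int))) :
    pvRun (l.map PvJob.extract) a acc
      = l.foldl (fun st e =>
          heapifyA e (listSwap st.2 0 e) 0 e
            (st.1 ++ [(listSwap st.2 0 e, some [(0 : Int), (e : Int)])])) (acc, a) := by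
  induction l generalizing a acc with
  | nil => simp [pvRun]
  | cons x xs ih =>
    have hx : 1 ≤ x := hl x (by simp)
    simp only [List.map_cons, List.foldl_cons]
    rw [pvRun]
    rw [pvRun_sift x _ _ _ _ _ hx (by omega)]
    rw [ih (fun e he => hl e (by simp [he]))]

theorem range_reverse_eq (m : Nat) :
    (List.range m).reverse = (List.range m).map (fun k => m - 1 - k) := by
  rw [List.range_eq_range', List.reverse_range']
  simp [List.range_eq_range']

-- `range(n//2 - 1, -1, -1)` as a map over a Nat range.
theorem build_range_eq (n : Nat) :
    PySem.List.pyRange (PySem.Int.floordiv (n : Int) 2 - 1) (-1) (-1)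
      = ((List.range (n / 2)).reverse).map (fun k : Nat => (k : Int)) := by
  rw [PySem.List.pyRange_neg_one, range_reverse_eq, List.map_map]
  have hfd : PySem.Int.floordiv (n : Int) 2 = ((n / 2 : Nat) : Int) := by
    exact_mod_cast PySem.Int.floordiv_natCast n 2
  have h1 : ((PySem.Int.floordiv (n : Int) 2 - 1) - (-1)).toNat = n / 2 := by omega
  rw [h1]
  refine List.map_congr_left ?_
  intro k hk
  rw [List.mem_range] at hk
  simp only [Function.comp_apply, hfd]
  omega

-- `range(n - 1, 0, -1)` as a map over a Nat range.
theorem extract_range_eq (n : Nat) :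
    PySem.List.pyRange ((n : Int) - 1) 0 (-1)
      = ((List.range' 1 (n - 1)).reverse).map (fun k : Nat => (k : Int)) := by
  rw [PySem.List.pyRange_neg_one, List.reverse_range', List.map_map]
  have h1 : (((n : Int) - 1) - 0).toNat = n - 1 := by omega
  rw [h1]
  refine List.map_congr_left ?_
  intro k hk
  rw [List.mem_range] at hk
  simp only [Function.comp_apply]
  omega

-- ===== VERDICT (by name: the statement is the Claim_ definition above) =====
theorem heap_sort_steps_spec : Claim_equal_heap_sort_steps := by
  intro arr _
  unfold Spec_heap_sort_steps
  by_cases h : arr = []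
  · simp [heap_sort_steps, heap_sort_steps_alt, h]
  · have hn : 1 ≤ arr.length := List.length_pos_iff.mpr h
    simp only [heap_sort_steps, heap_sort_steps_alt, h, if_false]
    rw [build_range_eq, extract_range_eq, List.foldl_map, List.foldl_map,
        List.map_map, List.map_map]
    simp only [Function.comp_def, Int.toNat_natCast]
    rw [pvRun_sifts arr.length hn]
    rw [pvRun_extracts _ (by intro e he; simp [List.mem_range'] at he; omega)]
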